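-- pv_equiv track=rewrite | github.com/awslabs/deequ | src/scripts/issue_bot/main.py | _already_replied_to_latest
-- ===== SOURCE A (Python) =====
-- def _already_replied_to_latest(comments):
--     """True if the bot already posted after the most recent non-bot comment."""
--     last_user_idx = -1
--     last_bot_idx = -1
--     for i, c in enumerate(comments):
--         if c.get("user", {}).get("login") == "github-actions[bot]":
--             last_bot_idx = i
--         else:
--             last_user_idx = i
--     return last_bot_idx > last_user_idx >= 0
-- ===== SOURCE B (Python) =====
-- def _already_replied_to_latest(comments):
--     """True if the bot already posted after the most recent non-bot comment."""
--     logins = [c.get("user", {}).get("login") for c in comments]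
--     return bool(logins) and logins[-1] == "github-actions[bot]" and any(
--         l != "github-actions[bot]" for l in logins
--     )
-- ===== Notes on version B (the rewrite author's own statement) =====
-- stated objective: simpler
-- what changed: Replaces the last-user-index/last-bot-index integer tracking with a direct statement of the condition: the final comment's login is the bot and some comment's login is not, via one mapped login list.
import Mathlib
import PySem

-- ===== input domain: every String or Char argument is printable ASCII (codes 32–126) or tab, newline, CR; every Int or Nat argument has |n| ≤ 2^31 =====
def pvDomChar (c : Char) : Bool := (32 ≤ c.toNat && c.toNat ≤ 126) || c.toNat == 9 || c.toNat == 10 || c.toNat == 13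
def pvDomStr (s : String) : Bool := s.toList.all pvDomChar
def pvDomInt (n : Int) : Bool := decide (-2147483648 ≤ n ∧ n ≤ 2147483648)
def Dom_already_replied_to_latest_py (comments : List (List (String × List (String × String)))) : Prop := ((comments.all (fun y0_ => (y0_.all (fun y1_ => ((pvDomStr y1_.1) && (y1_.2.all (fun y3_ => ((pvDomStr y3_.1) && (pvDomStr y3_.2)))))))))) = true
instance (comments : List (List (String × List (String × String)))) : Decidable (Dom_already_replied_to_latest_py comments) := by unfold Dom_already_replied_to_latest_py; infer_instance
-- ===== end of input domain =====

-- B states the condition directly — last login is the bot and some login is not — instead of A's last-user/last-bot index bookkeeping; objective: simpler.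

-- ===== PORT A =====
-- shared helper: c.get("user", {}).get("login") — first-match lookup in the association list (none = missing key)
def pvLoginOf (c : List (String × List (String × String))) : Option String :=
  ((((c.find? (fun kv => kv.1 == "user")).map (·.2)).getD []).find? (fun kv => kv.1 == "login")).map (·.2)

def already_replied_to_latest_py (comments : List (List (String × List (String × String)))) : Bool :=
  -- for i, c in enumerate(comments): update last_user_idx / last_bot_idx
  let st := comments.foldl
    (fun (s : Int × Int × Int) c =>
      if pvLoginOf c == some "github-actions[bot]" then (s.1 + 1, s.2.1, s.1)
      else (s.1 + 1, s.1, s.2.2))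
    ((0 : Int), (-1 : Int), (-1 : Int))
  decide (st.2.2 > st.2.1 ∧ st.2.1 ≥ 0)

-- ===== PORT B =====
def already_replied_to_latest_py_alt (comments : List (List (String × List (String × String)))) : Bool :=
  let logins := comments.map pvLoginOf
  !logins.isEmpty
    && (PySem.List.pyGet? logins (-1) == some (some "github-actions[bot]"))
    && logins.any (fun l => l != some "github-actions[bot]")

-- ===== PRECONDITION & SPEC =====
def Spec_already_replied_to_latest_py (comments : List (List (String × List (String × String)))) (out : Bool) : Prop := out = already_replied_to_latest_py_alt comments
instance (comments : List (List (String × List (String × String)))) (out : Bool) : Decidable (Spec_already_replied_to_latest_py comments out) := by unfold Spec_already_replied_to_latest_py; infer_instance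

-- ===== CLAIM (what is proved, stated in full; the proofs are below) =====
def Claim_equal_already_replied_to_latest_py : Prop := ∀ (comments : List (List (String × List (String × String)))), Dom_already_replied_to_latest_py comments → Spec_already_replied_to_latest_py comments (already_replied_to_latest_py comments)

-- ===== LEMMAS AND PROOFS =====

-- classification of one comment, shared shorthand for the proofs
def pvIsBot (c : List (String × List (String × String))) : Bool :=
  pvLoginOf c == some "github-actions[bot]"

-- characterisation of A's fold from an arbitrary state (i, u, b) with u < i, b < i, 0 ≤ i
theorem pvFoldA_char (l : List (List (String × List (String × String)))) :
    ∀ (i u b : Int), u < i → b < i → 0 ≤ i →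
    (decide ((l.foldl
      (fun (s : Int × Int × Int) c =>
        if pvLoginOf c == some "github-actions[bot]" then (s.1 + 1, s.2.1, s.1)
        else (s.1 + 1, s.1, s.2.2)) (i, u, b)).2.2 >
      (l.foldl
      (fun (s : Int × Int × Int) c =>
        if pvLoginOf c == some "github-actions[bot]" then (s.1 + 1, s.2.1, s.1)
        else (s.1 + 1, s.1, s.2.2)) (i, u, b)).2.1 ∧
      (l.foldl
      (fun (s : Int × Int × Int) c =>
        if pvLoginOf c == some "github-actions[bot]" then (s.1 + 1, s.2.1, s.1)
        else (s.1 + 1, s.1, s.2.2)) (i, u, b)).2.1 ≥ 0)) =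
    match l.getLast? with
    | none => decide (b > u ∧ u ≥ 0)
    | some x => pvIsBot x && (decide (u ≥ 0) || l.any (fun c => !pvIsBot c)) := by
  induction l with
  | nil => intro i u b _ _ _; simp
  | cons x xs ih =>
    intro i u b hu hb hi
    by_cases hx : pvIsBot x
    · have hx' : (pvLoginOf x == some "github-actions[bot]") = true := hx
      simp only [List.foldl_cons, hx', List.getLast?_cons, List.any_cons, hx,
        Bool.not_true, Bool.false_or, if_true]
      rw [ih (i + 1) u i (by omega) (by omega) (by omega)]
      cases hxs : xs.getLast? with
      | none =>
        have : xs = [] := List.getLast?_eq_none_iff.mp hxs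
        subst this
        simp [pvIsBot, hx']
        omega
      | some y =>
        rfl
    · have hx' : (pvLoginOf x == some "github-actions[bot]") = false := by
        simpa [pvIsBot] using hx
      simp only [List.foldl_cons, hx', Bool.false_eq_true, List.getLast?_cons,
        List.any_cons, hx, Bool.not_false, Bool.true_or, if_false]
      rw [ih (i + 1) i b (by omega) (by omega) (by omega)]
      cases hxs : xs.getLast? with
      | none =>
        have : xs = [] := List.getLast?_eq_none_iff.mp hxs
        subst this
        simp [pvIsBot, hx']
        omega
      | some y =>
        simp [hi]

-- ===== VERDICT (by name: the statement is the Claim_ definition above) =====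
theorem already_replied_to_latest_py_spec : Claim_equal_already_replied_to_latest_py := by
  intro comments _
  unfold Spec_already_replied_to_latest_py already_replied_to_latest_py already_replied_to_latest_py_alt
  simp only []
  rw [pvFoldA_char comments 0 (-1) (-1) (by omega) (by omega) (by omega)]
  rw [PySem.List.pyGet?_neg_one]
  cases hl : comments.getLast? with
  | none =>
    have : comments = [] := List.getLast?_eq_none_iff.mp hl
    subst this; simp
  | some x =>
    have hne : comments ≠ [] := by intro h; subst h; simp at hl
    have hmap : (comments.map pvLoginOf).getLast? = some (pvLoginOf x) := by
      rw [List.getLast?_map, hl]; rfl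
    have hemp : comments.isEmpty = false := by simp [hne]
    simp [hmap, List.any_map, pvIsBot, Function.comp_def, hemp, bne]
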